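-- pv_equiv track=rewrite | github.com/jmbotero/algorithms | sudoku.py | __getleftcenterright_blockcolumnindices
-- ===== SOURCE A (Python) =====
-- def __getleftcenterright_blockcolumnindices(indices):
--     result = None
--
--     blockrow_index = [0, 1, 2]
--     indexranges = [[0, 3, 6], [1, 4, 7], [2, 5, 8]]
--
--     for index in indices:
--         for i, irange in enumerate(indexranges):
--             if index in irange:
--                 if i in blockrow_index:
--                     blockrow_index.remove(i)
--     if len(blockrow_index) == 1:
--         result = indexranges[blockrow_index[0]]
--
--     return result
-- ===== SOURCE B (Python) =====
-- def __getleftcenterright_blockcolumnindices(indices):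
--     # closed-form: each in-range index sits in block-column index % 3
--     found = {index % 3 for index in indices if index in range(9)}
--     missing = [i for i in (0, 1, 2) if i not in found]
--     indexranges = [[0, 3, 6], [1, 4, 7], [2, 5, 8]]
--     return indexranges[missing[0]] if len(missing) == 1 else None
-- ===== Notes on version B (the rewrite author's own statement) =====
-- stated objective: simpler
-- what changed: Replaces the nested membership-scan-and-remove over the three index ranges by a closed-form mapping (index % 3 for indices in range(9)) into a set of present block-columns plus a complement against {0,1,2}; the inner enumerate/remove loop disappears.
import Mathlib
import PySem

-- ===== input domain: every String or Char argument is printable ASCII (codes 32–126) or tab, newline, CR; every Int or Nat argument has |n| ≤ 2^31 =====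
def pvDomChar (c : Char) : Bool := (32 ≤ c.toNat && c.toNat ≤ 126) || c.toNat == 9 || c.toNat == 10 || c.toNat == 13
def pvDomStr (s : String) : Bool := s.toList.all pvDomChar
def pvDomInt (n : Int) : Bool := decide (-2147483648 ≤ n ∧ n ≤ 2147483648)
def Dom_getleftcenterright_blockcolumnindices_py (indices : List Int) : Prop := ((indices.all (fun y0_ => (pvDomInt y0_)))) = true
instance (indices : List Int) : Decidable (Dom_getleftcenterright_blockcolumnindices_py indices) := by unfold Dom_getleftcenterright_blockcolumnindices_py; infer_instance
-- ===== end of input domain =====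

-- B replaces A's nested scan-and-remove over the three ranges by a closed-form
-- `index % 3` mapping into a set of present block-columns plus a complement (simpler).

-- ===== PORT A =====
def pvRangesA : List (List Int) := [[0, 3, 6], [1, 4, 7], [2, 5, 8]]

-- inner 'for i, irange in enumerate(indexranges)' loop body of A
def pvStepA (br : List Int) (index : Int) : List Int :=
  (PySem.List.enumerate pvRangesA).foldl
    (fun br p =>
      if index ∈ p.2 then
        if (p.1 : Int) ∈ br then (PySem.List.remove? br p.1).getD br else br
      else br) br

def getleftcenterright_blockcolumnindices_py (indices : List Int) : Option (List Int) :=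
  let blockrow := indices.foldl pvStepA [0, 1, 2]
  if blockrow.length = 1 then PySem.List.pyGet? pvRangesA (blockrow.headD 0) else none

-- ===== PORT B =====
def getleftcenterright_blockcolumnindices_py_alt (indices : List Int) : Option (List Int) :=
  let found : PySem.Set Int :=
    PySem.Set.ofList
      ((indices.filter (fun x => decide (0 ≤ x ∧ x < 9))).map (fun x => PySem.Int.mod x 3))
  let missing := ([0, 1, 2] : List Int).filter (fun i => !(PySem.Set.contains found i))
  let indexranges : List (List Int) := [[0, 3, 6], [1, 4, 7], [2, 5, 8]]
  if missing.length = 1 then PySem.List.pyGet? indexranges (missing.headD 0) else none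

-- ===== PRECONDITION & SPEC =====
def Spec_getleftcenterright_blockcolumnindices_py (indices : List Int) (out : Option (List Int)) : Prop := out = getleftcenterright_blockcolumnindices_py_alt indices
instance (indices : List Int) (out : Option (List Int)) : Decidable (Spec_getleftcenterright_blockcolumnindices_py indices out) := by unfold Spec_getleftcenterright_blockcolumnindices_py; infer_instance

-- ===== CLAIM (what is proved, stated in full; the proofs are below) =====
def Claim_equal_getleftcenterright_blockcolumnindices_py : Prop := ∀ (indices : List Int), Dom_getleftcenterright_blockcolumnindices_py indices → Spec_getleftcenterright_blockcolumnindices_py indices (getleftcenterright_blockcolumnindices_py indices)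

-- ===== LEMMAS AND PROOFS =====

-- 'x hits block-column i'
def pvHit (x i : Int) : Bool := decide (0 ≤ x ∧ x < 9) && decide (PySem.Int.mod x 3 = i)

lemma pvHit0 (x : Int) : (x ∈ ([0, 3, 6] : List Int)) ↔ pvHit x 0 = true := by
  simp [pvHit]; omega

lemma pvHit1 (x : Int) : (x ∈ ([1, 4, 7] : List Int)) ↔ pvHit x 1 = true := by
  simp [pvHit]; omega

lemma pvHit2 (x : Int) : (x ∈ ([2, 5, 8] : List Int)) ↔ pvHit x 2 = true := by
  simp [pvHit]; omega

lemma pvStepA_filter (p : Int → Bool) (x : Int) :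
    pvStepA (([0, 1, 2] : List Int).filter p) x
      = ([0, 1, 2] : List Int).filter (fun i => p i && !pvHit x i) := by
  have h0 := pvHit0 x
  have h1 := pvHit1 x
  have h2 := pvHit2 x
  by_cases c0 : x ∈ ([0, 3, 6] : List Int) <;>
  by_cases c1 : x ∈ ([1, 4, 7] : List Int) <;>
  by_cases c2 : x ∈ ([2, 5, 8] : List Int) <;>
  cases hp0 : p 0 <;> cases hp1 : p 1 <;> cases hp2 : p 2 <;>
    first
    | (exfalso; simp at c0 c1 c2; omega)
    | (simp only [pvHit0, pvHit1, pvHit2] at c0 c1 c2;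
       simp_all [pvStepA, pvRangesA, PySem.List.enumerate, PySem.List.remove?,
                 List.filter];
       try decide)

def pvPresent (indices : List Int) (i : Int) : Bool := indices.any (fun x => pvHit x i)

lemma pvFoldA (indices : List Int) (p : Int → Bool) :
    indices.foldl pvStepA (([0, 1, 2] : List Int).filter p)
      = ([0, 1, 2] : List Int).filter (fun i => p i && !pvPresent indices i) := by
  induction indices generalizing p with
  | nil => simp [pvPresent]
  | cons x rest ih =>
    rw [List.foldl_cons, pvStepA_filter, ih]
    apply List.filter_congr
    intro i _
    simp [pvPresent]
    cases pvHit x i <;> simp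

lemma pvMissing_eq (indices : List Int) :
    (([0, 1, 2] : List Int).filter
        (fun i => !(PySem.Set.contains (PySem.Set.ofList
            ((indices.filter (fun x => decide (0 ≤ x ∧ x < 9))).map
              (fun x => PySem.Int.mod x 3))) i)))
      = ([0, 1, 2] : List Int).filter (fun i => !pvPresent indices i) := by
  apply List.filter_congr
  intro i _
  have h : (PySem.Set.contains (PySem.Set.ofList
      ((indices.filter (fun x => decide (0 ≤ x ∧ x < 9))).map
        (fun x => PySem.Int.mod x 3))) i = true) ↔ pvPresent indices i = true := by
    simp [PySem.Set.mem_ofList, pvPresent, pvHit,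
      List.mem_map, List.mem_filter, List.any_eq_true]
    constructor
    · rintro ⟨x, ⟨hx, hg⟩, hm⟩; exact ⟨x, hx, hg, hm⟩
    · rintro ⟨x, hx, hg, hm⟩; exact ⟨x, ⟨hx, hg⟩, hm⟩
  rcases Bool.eq_false_or_eq_true (pvPresent indices i) with hp | hp <;>
    simp_all

-- ===== VERDICT (by name: the statement is the Claim_ definition above) =====
theorem getleftcenterright_blockcolumnindices_py_spec : Claim_equal_getleftcenterright_blockcolumnindices_py := by
  intro indices _
  unfold Spec_getleftcenterright_blockcolumnindices_py
  unfold getleftcenterright_blockcolumnindices_py getleftcenterright_blockcolumnindices_py_alt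
  have hA : indices.foldl pvStepA [0, 1, 2]
      = ([0, 1, 2] : List Int).filter (fun i => !pvPresent indices i) := by
    have := pvFoldA indices (fun _ => true)
    simpa using this
  simp only [hA, pvMissing_eq, pvRangesA]
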